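-- pv_equiv track=rewrite | github.com/noTirT/AdventOfCode | 2023/day13/part2.py | find_possible_lines
-- ===== SOURCE A (Python) =====
-- def find_possible_lines(line: str):
--     result = {}
--
--     for left in range(len(line) - 1):
--         inaccuracy = 0
--         for offset in range(0, min(left, len(line) - left - 2) + 1):
--             left_check, right_check = line[left - offset], line[left + offset + 1]
--             if left_check != right_check:
--                 inaccuracy += 1
--         if inaccuracy <= 1:
--             result[(left, left + 1)] = inaccuracy
--     return result
-- ===== SOURCE B (Python) =====
-- def find_possible_lines(line: str):
--     # Inverted traversal: instead of scanning offsets per center, scan every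
--     # index pair (i, j) with i < j and i + j odd once; a mismatched pair
--     # contributes one inaccuracy to the single center (i + j - 1) // 2 it
--     # belongs to (offset (j - i - 1) // 2 there).  A counter keyed by center
--     # accumulates the contributions; a final pass emits centers with <= 1.
--     n = len(line)
--     counts = {}
--     for i in range(n):
--         for j in range(i + 1, n):
--             if (i + j) % 2 == 1 and line[i] != line[j]:
--                 center = (i + j - 1) // 2
--                 counts[center] = counts.get(center, 0) + 1
--     result = {}
--     for left in range(n - 1):
--         c = counts.get(left, 0)
--         if c <= 1:
--             result[(left, left + 1)] = c
--     return result
-- ===== Notes on version B (the rewrite author's own statement) =====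
-- stated objective: alternative
-- what changed: B inverts the traversal: instead of A's per-center scan over mirror offsets, it makes one pass over index pairs (i, j) with i < j and i + j odd, charging each mismatched pair to its unique center (i+j-1)//2 in a counter dict, then emits the centers whose count is at most 1 in a second pass.
import Mathlib
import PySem

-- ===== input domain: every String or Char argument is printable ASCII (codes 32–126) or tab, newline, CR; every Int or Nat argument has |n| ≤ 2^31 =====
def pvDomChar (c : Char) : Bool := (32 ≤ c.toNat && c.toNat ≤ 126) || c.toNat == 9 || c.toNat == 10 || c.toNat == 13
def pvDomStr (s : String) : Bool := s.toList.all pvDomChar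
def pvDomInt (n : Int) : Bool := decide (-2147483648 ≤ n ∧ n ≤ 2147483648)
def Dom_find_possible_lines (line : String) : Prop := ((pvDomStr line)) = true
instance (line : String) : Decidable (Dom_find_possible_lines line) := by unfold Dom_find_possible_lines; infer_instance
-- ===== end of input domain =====

-- B inverts A's traversal: one pass over index pairs (i, j) with i < j charging each mismatched
-- odd-sum pair to its unique center in a counter dict, then a pass emitting centers with count <= 1
-- (same exact result; an alternative decomposition, not claimed faster).


-- ===== PORT A =====
-- Python dict with keys (left, left+1) and value inaccuracy; returned flattened as (left, left+1, inaccuracy).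
def find_possible_lines (line : String) : List (Int × Int × Int) :=
  let cs := line.toList
  let n : Int := cs.length
  let result : PySem.Dict (Int × Int) Int :=
    (PySem.List.pyRange 0 (n - 1)).foldl (fun result left =>
      let inaccuracy : Int :=
        (PySem.List.pyRange 0 (min left (n - left - 2) + 1)).foldl (fun inaccuracy offset =>
          -- line[left - offset], line[left + offset + 1]: always in range for these loop bounds
          let left_check := PySem.List.pyGetD cs (left - offset) ' '
          let right_check := PySem.List.pyGetD cs (left + offset + 1) ' '
          if left_check ≠ right_check then inaccuracy + 1 else inaccuracy) 0
      if inaccuracy ≤ 1 then result.insert (left, left + 1) inaccuracy else result)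
      PySem.Dict.empty
  result.items.map (fun p => (p.1.1, p.1.2, p.2))

-- ===== PORT B =====
def find_possible_lines_alt (line : String) : List (Int × Int × Int) :=
  let cs := line.toList
  let n : Int := cs.length
  -- counter pass: counts[center] += 1 at every mismatched odd-sum pair (i, j)
  let counts : PySem.Dict Int Int :=
    (PySem.List.pyRange 0 n).foldl (fun counts i =>
      (PySem.List.pyRange (i + 1) n).foldl (fun counts j =>
        if PySem.Int.mod (i + j) 2 = 1 ∧
            PySem.List.pyGetD cs i ' ' ≠ PySem.List.pyGetD cs j ' ' then
          -- counts[center] = counts.get(center, 0) + 1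
          counts.modify (PySem.Int.floordiv (i + j - 1) 2) 0 (· + 1)
        else counts) counts) PySem.Dict.empty
  -- emit pass
  let result : PySem.Dict (Int × Int) Int :=
    (PySem.List.pyRange 0 (n - 1)).foldl (fun result left =>
      let c := counts.getD left 0
      if c ≤ 1 then result.insert (left, left + 1) c else result)
      PySem.Dict.empty
  result.items.map (fun p => (p.1.1, p.1.2, p.2))

-- ===== PRECONDITION & SPEC =====
def Spec_find_possible_lines (line : String) (out : List (Int × Int × Int)) : Prop := out = find_possible_lines_alt line
instance (line : String) (out : List (Int × Int × Int)) : Decidable (Spec_find_possible_lines line out) := by unfold Spec_find_possible_lines; infer_instance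

-- ===== CLAIM (what is proved, stated in full; the proofs are below) =====
def Claim_equal_find_possible_lines : Prop := ∀ (line : String), Dom_find_possible_lines line → Spec_find_possible_lines line (find_possible_lines line)

-- ===== LEMMAS AND PROOFS =====

-- the mirror window width at center L, and the plain mismatch count there
def pvW (len L : Nat) : Nat := min (L + 1) (len - L - 1)

def pvCnt (cs : List Char) (L : Nat) : Nat :=
  (List.range (pvW cs.length L)).countP
    (fun k => decide (cs.getD (L - k) ' ' ≠ cs.getD (L + k + 1) ' '))

-- countP over Finset.range is countP over List.range
theorem pvCardFilterRange (n : Nat) (p : Nat → Bool) :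
    ((Finset.range n).filter (fun i => p i)).card = (List.range n).countP p := by
  simp only [Finset.card, Finset.filter_val, Finset.range_val, Multiset.range]
  rw [Multiset.filter_coe, Multiset.coe_card, List.countP_eq_length_filter]
  simp

-- reindexing a countP over range n by i ↦ v - i onto range w
theorem pvCountP_range_shift (v w n : Nat) (P Q : Nat → Bool) (hw : w ≤ v + 1)
    (hQ : ∀ k, k < w → Q k = P (v - k))
    (hsupp : ∀ i, P i = true → i ≤ v ∧ v - i < w ∧ i < n) :
    (List.range n).countP P = (List.range w).countP Q := by
  rw [← pvCardFilterRange, ← pvCardFilterRange]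
  apply Finset.card_bij' (fun i _ => v - i) (fun k _ => v - k)
  · intro i hi
    simp only [Finset.mem_filter, Finset.mem_range] at *
    obtain ⟨h1, h2⟩ := hi
    have := hsupp i h2
    refine ⟨by omega, ?_⟩
    rw [hQ _ (by omega), show v - (v - i) = i by omega]
    exact h2
  · intro k hk
    simp only [Finset.mem_filter, Finset.mem_range] at *
    obtain ⟨h1, h2⟩ := hk
    rw [hQ _ h1] at h2
    have := hsupp _ h2
    exact ⟨by omega, h2⟩
  · intro i hi
    simp only [Finset.mem_filter, Finset.mem_range] at hi
    have := hsupp i hi.2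
    omega
  · intro k hk
    simp only [Finset.mem_filter, Finset.mem_range] at hk
    omega

-- countP of a predicate with (at most) one satisfier t0
theorem pvCountP_range_unique (m t0 : Nat) (c : Bool) :
    (List.range m).countP (fun t => decide (t = t0) && c) = if t0 < m ∧ c = true then 1 else 0 := by
  induction m with
  | zero => simp
  | succ m ih =>
    rw [List.range_succ, List.countP_append, ih]
    by_cases h : m = t0
    · by_cases hc : c = true
      · simp [hc, h]
      · simp [hc]
    · by_cases hc : c = true
      · simp [hc, h]
        split_ifs <;> omega
      · simp [hc]

-- A's inner loop over offsets equals the mismatch count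
theorem pvInner_eq_cnt (cs : List Char) (L : Nat) (hL : L + 2 ≤ cs.length) :
    (PySem.List.pyRange 0 (min (L : Int) ((cs.length : Int) - L - 2) + 1)).foldl
      (fun inaccuracy offset =>
        if PySem.List.pyGetD cs ((L : Int) - offset) ' ' ≠ PySem.List.pyGetD cs ((L : Int) + offset + 1) ' '
        then inaccuracy + 1 else inaccuracy) 0 = (pvCnt cs L : Int) := by
  have hw : min (L : Int) ((cs.length : Int) - L - 2) + 1 = ((pvW cs.length L : Nat) : Int) := by
    unfold pvW; push_cast; omega
  rw [hw, PySem.List.pyRange_zero_nat, List.foldl_map]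
  rw [PySem.List.foldl_congr_mem _ _
    (fun (acc : Int) (k : Nat) =>
      if (fun k => decide (cs.getD (L - k) ' ' ≠ cs.getD (L + k + 1) ' ')) k = true then acc + 1 else acc) 0 ?_]
  · rw [PySem.List.foldl_count_if]
    simp [pvCnt]
  · intro acc k hk
    have hkw : k < pvW cs.length L := List.mem_range.mp hk
    have hwle : pvW cs.length L ≤ L + 1 := by unfold pvW; omega
    have h1 : (L : Int) - (k : Int) = ((L - k : Nat) : Int) := by omega
    have h2 : (L : Int) + (k : Int) + 1 = ((L + k + 1 : Nat) : Int) := by push_cast; omega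
    rw [h1, h2, PySem.List.pyGetD_natCast, PySem.List.pyGetD_natCast]
    simp

-- the centers charged by the mismatched odd-sum pairs (i, j) scanned at outer index i
def pvK (cs : List Char) (i : Nat) : List Int :=
  ((PySem.List.pyRange ((i : Int) + 1) (cs.length : Int)).filter
    (fun j => decide (PySem.Int.mod ((i : Int) + j) 2 = 1 ∧
      PySem.List.pyGetD cs (i : Int) ' ' ≠ PySem.List.pyGetD cs j ' '))).map
    (fun j => PySem.Int.floordiv ((i : Int) + j - 1) 2)

-- "outer index i charges center L": the partner j = 2L+1-i exists and mismatches
def pvPind (cs : List Char) (L i : Nat) : Bool :=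
  decide (i ≤ L) && decide (2*L + 1 - i < cs.length) &&
  decide (cs.getD i ' ' ≠ cs.getD (2*L + 1 - i) ' ')

-- each outer index charges center L at most once, exactly when pvPind holds
theorem pvK_count (cs : List Char) (L i : Nat) :
    List.count ((L : Int)) (pvK cs i) = if pvPind cs L i then 1 else 0 := by
  rw [pvK, List.count_eq_countP, List.countP_map, List.countP_filter,
    PySem.List.pyRange_one, List.countP_map]
  by_cases hi : i + 1 < cs.length
  · have hm : ((cs.length : Int) - ((i : Int) + 1)).toNat = cs.length - i - 1 := by omega
    rw [hm, List.countP_congr (q := fun t => decide (t = 2*(L - i)) && pvPind cs L i) ?hpt,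
      pvCountP_range_unique]
    case hpt =>
      intro t ht
      have htm : t < cs.length - i - 1 := List.mem_range.mp ht
      simp only [Function.comp_apply, Bool.and_eq_true, decide_eq_true_eq, beq_iff_eq, pvPind]
      rw [show (i : Int) + ((i : Int) + 1 + (t : Int)) = ((2*i + 1 + t : Nat) : Int) by push_cast; ring]
      rw [show ((2*i + 1 + t : Nat) : Int) - 1 = ((2*i + t : Nat) : Int) by push_cast; ring]
      rw [show PySem.Int.floordiv ((2*i + t : Nat) : Int) 2 = (((2*i + t)/2 : Nat) : Int) from
        by exact_mod_cast PySem.Int.floordiv_natCast (2*i + t) 2]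
      rw [show PySem.Int.mod ((2*i + 1 + t : Nat) : Int) 2 = (((2*i + 1 + t) % 2 : Nat) : Int) from
        by exact_mod_cast PySem.Int.mod_natCast (2*i + 1 + t) 2]
      rw [show (i : Int) + 1 + (t : Int) = ((i + 1 + t : Nat) : Int) by push_cast; ring]
      rw [PySem.List.pyGetD_natCast, PySem.List.pyGetD_natCast]
      constructor
      · rintro ⟨hkey, hpar, hne⟩
        have hkey' : (2*i + t)/2 = L := by exact_mod_cast hkey
        have hpar' : (2*i + 1 + t) % 2 = 1 := by exact_mod_cast hpar
        refine ⟨by omega, ⟨by omega, by omega⟩, ?_⟩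
        rw [show 2*L + 1 - i = i + 1 + t by omega]
        exact hne
      · rintro ⟨ht0, ⟨hiL, hlen⟩, hne⟩
        refine ⟨?_, ?_, ?_⟩
        · have h : (2*i + t)/2 = L := by omega
          exact_mod_cast h
        · have h : (2*i + 1 + t) % 2 = 1 := by omega
          exact_mod_cast h
        · rw [show i + 1 + t = 2*L + 1 - i by omega]
          exact hne
    by_cases hp : pvPind cs L i = true
    · have hprops : i ≤ L ∧ 2*L + 1 - i < cs.length := by
        have := hp
        simp only [pvPind, Bool.and_eq_true, decide_eq_true_eq] at this
        exact ⟨this.1.1, this.1.2⟩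
      rw [if_pos ⟨by omega, hp⟩, if_pos hp]
    · rw [if_neg (fun h => hp h.2), if_neg hp]
  · rw [show ((cs.length : Int) - ((i : Int) + 1)).toNat = 0 by omega]
    have hp : pvPind cs L i = false := by
      by_contra h
      have hp' : pvPind cs L i = true := by simpa using h
      simp only [pvPind, Bool.and_eq_true, decide_eq_true_eq] at hp'
      omega
    simp [hp]

-- B's counter dict looks up the mismatch count of each center
theorem pvCounts_getD (cs : List Char) (L : Nat) (hL : L + 2 ≤ cs.length) :
    ((PySem.List.pyRange 0 (cs.length : Int)).foldl (fun counts i =>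
      (PySem.List.pyRange (i + 1) (cs.length : Int)).foldl (fun counts j =>
        if PySem.Int.mod (i + j) 2 = 1 ∧
            PySem.List.pyGetD cs i ' ' ≠ PySem.List.pyGetD cs j ' ' then
          counts.modify (PySem.Int.floordiv (i + j - 1) 2) 0 (· + 1)
        else counts) counts) PySem.Dict.empty).getD (L : Int) 0 = (pvCnt cs L : Int) := by
  rw [PySem.List.pyRange_zero_nat, List.foldl_map]
  rw [PySem.List.foldl_congr_mem (List.range cs.length) _
    (fun (d : PySem.Dict Int Int) (i : Nat) =>
      (pvK cs i).foldl (fun d x => d.modify x 0 (· + 1)) d) PySem.Dict.empty ?_]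
  · rw [← List.foldl_flatMap, PySem.Dict.getD_foldl_modify_add_one, List.count_flatMap]
    have hemp : (PySem.Dict.empty : PySem.Dict Int Int).getD (L : Int) 0 = 0 := rfl
    rw [hemp, zero_add]
    have hmap : List.map (List.count ((L : Int)) ∘ pvK cs) (List.range cs.length)
        = List.map (fun i => if pvPind cs L i then 1 else 0) (List.range cs.length) := by
      apply List.map_congr_left
      intro a _
      exact pvK_count cs L a
    rw [hmap, PySem.List.sum_map_ite_one_zero_nat]
    congr 1
    rw [pvCnt]
    apply pvCountP_range_shift L (pvW cs.length L) cs.length _ _ (by simp only [pvW]; omega)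
    · intro k hk
      have hk' : k < min (L + 1) (cs.length - L - 1) := by simpa [pvW] using hk
      have h1 : 2*L + 1 - (L - k) = L + k + 1 := by omega
      simp [pvPind, h1, show L - k ≤ L by omega, show L + k + 1 < cs.length by omega]
    · intro j hj
      simp only [pvPind, Bool.and_eq_true, decide_eq_true_eq] at hj
      refine ⟨hj.1.1, ?_, by omega⟩
      simp only [pvW]
      omega
  · intro d i hi
    beta_reduce
    rw [PySem.List.foldl_ite_eq_foldl_filter
      (p := fun j => PySem.Int.mod ((i : Int) + j) 2 = 1 ∧
        PySem.List.pyGetD cs (i : Int) ' ' ≠ PySem.List.pyGetD cs j ' ')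
      (f := fun (dd : PySem.Dict Int Int) j =>
        dd.modify (PySem.Int.floordiv ((i : Int) + j - 1) 2) 0 (· + 1))]
    rw [pvK, List.foldl_map]

-- ===== VERDICT (by name: the statement is the Claim_ definition above) =====
theorem find_possible_lines_spec : Claim_equal_find_possible_lines := by
  intro line _
  unfold Spec_find_possible_lines find_possible_lines find_possible_lines_alt
  simp only []
  refine congrArg (List.map _) (congrArg PySem.Dict.items ?_)
  apply PySem.List.foldl_congr_mem
  intro res left hmem
  rw [PySem.List.mem_pyRange_one] at hmem
  have hL : left = ((left.toNat : Nat) : Int) := by omega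
  have h2 : left.toNat + 2 ≤ line.toList.length := by omega
  rw [hL, pvInner_eq_cnt line.toList left.toNat h2, pvCounts_getD line.toList left.toNat h2]
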